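-- pv_equiv track=rewrite | github.com/atavera4/Comp_Network_Security_Project | Ariel Taveras Project 3/scanproject.py | GetScannerIPAddress
-- ===== SOURCE A (Python) =====
-- def GetScannerIPAddress(line):
--     ip_start = 4
--     ip_end = 4
--     position = 0
--     periods = 0
--     address = ''
--     for character in line:
--         if(character == ' '):
--             position += 1
--         elif(position >= ip_start):
--             address = address + character
--             if(character == '.'):
--                 periods += 1
--                 if(periods >= ip_end):
--                     return address;
--
--     return address;
-- ===== SOURCE B (Python) =====
-- def GetScannerIPAddress(line):
--     # Two-phase: locate the suffix after the 4th space, then despace it and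
--     # cut right after its 4th period using the list of period positions.
--     tail = _after_nth_space(line, 4)
--     if tail is None:
--         return ''
--     rest = [c for c in tail if c != ' ']
--     dots = [i for i, c in enumerate(rest) if c == '.']
--     if len(dots) < 4:
--         return ''.join(rest)
--     return ''.join(rest[:dots[3] + 1])
--
-- def _after_nth_space(s, n):
--     """Suffix of s immediately after the n-th space, or None if fewer spaces."""
--     for i, ch in enumerate(s):
--         if ch == ' ':
--             n -= 1
--             if n == 0:
--                 return s[i + 1:]
--     return None
-- ===== Notes on version B (the rewrite author's own statement) =====
-- stated objective: alternative
-- what changed: Replaces the single char-by-char loop with three counters and string accumulation by a two-phase segment decomposition: find the suffix after the 4th space, despace it with a filter, and slice it right after its 4th period using the list of period positions.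
import Mathlib
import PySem

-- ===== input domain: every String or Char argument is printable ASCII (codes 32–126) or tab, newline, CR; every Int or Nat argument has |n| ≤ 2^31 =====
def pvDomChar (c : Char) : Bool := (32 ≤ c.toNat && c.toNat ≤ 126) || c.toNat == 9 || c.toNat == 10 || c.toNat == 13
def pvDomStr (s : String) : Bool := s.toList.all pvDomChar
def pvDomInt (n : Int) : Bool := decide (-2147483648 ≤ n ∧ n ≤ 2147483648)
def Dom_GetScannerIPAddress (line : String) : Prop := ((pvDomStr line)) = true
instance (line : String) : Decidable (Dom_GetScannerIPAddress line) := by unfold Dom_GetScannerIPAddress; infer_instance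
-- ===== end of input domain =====

-- B replaces A's single counter-driven accumulation loop by a two-phase segment
-- decomposition (suffix after the 4th space, then filter + slice at the 4th period); alternative, same cost.


-- ===== PORT A =====
-- A's for-loop as structural recursion over the same state (position, periods, address);
-- ip_start = ip_end = 4 appear as the literal 4.  Early 'return' ends the recursion.
def goA : List Char → Int → Int → List Char → List Char
  | [], _, _, address => address
  | c :: rest, position, periods, address =>
    if c = ' ' then goA rest (position + 1) periods address
    else if position ≥ 4 then
      if c = '.' then
        if periods + 1 ≥ 4 then address ++ [c]
        else goA rest position (periods + 1) (address ++ [c])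
      else goA rest position periods (address ++ [c])
    else goA rest position periods address

def GetScannerIPAddress (line : String) : String := String.ofList (goA line.toList 0 0 [])

-- ===== PORT B =====
-- _after_nth_space: the enumerate loop; at position i the slice s[i+1:] is exactly the remaining tail.
def afterNthSpace : List Char → Int → Option (List Char)
  | [], _ => none
  | c :: rest, n =>
    if c = ' ' then (if n - 1 = 0 then some rest else afterNthSpace rest (n - 1))
    else afterNthSpace rest n

def GetScannerIPAddress_alt (line : String) : String :=
  match afterNthSpace line.toList 4 with
  | none => ""
  | some tail =>
    let rest := tail.filter (fun c => c ≠ ' ')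
    let dots := ((PySem.List.enumerate rest).filter (fun p => p.2 == '.')).map Prod.fst
    if dots.length < 4 then String.ofList rest
    -- dots[3] is guarded by the length test, so List.getD is exact here
    else String.ofList (PySem.List.slice rest none (some (dots.getD 3 0 + 1)))

-- ===== PRECONDITION & SPEC =====
def Spec_GetScannerIPAddress (line : String) (out : String) : Prop := out = GetScannerIPAddress_alt line
instance (line : String) (out : String) : Decidable (Spec_GetScannerIPAddress line out) := by unfold Spec_GetScannerIPAddress; infer_instance

-- ===== CLAIM (what is proved, stated in full; the proofs are below) =====
def Claim_equal_GetScannerIPAddress : Prop := ∀ (line : String), Dom_GetScannerIPAddress line → Spec_GetScannerIPAddress line (GetScannerIPAddress line)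

-- ===== LEMMAS AND PROOFS =====

-- A's phase 2 (position ≥ 4) with a Nat budget k = 4 - periods of remaining dots.
def trunc : List Char → Nat → List Char
  | [], _ => []
  | c :: r, k => if c = '.' then (if k ≤ 1 then [c] else c :: trunc r (k - 1)) else c :: trunc r k

-- period positions of a despaced rest, as plain Nats
def dotPos : List Char → List Nat
  | [] => []
  | c :: r => if c = '.' then 0 :: (dotPos r).map (· + 1) else (dotPos r).map (· + 1)

theorem goA_high (l : List Char) : ∀ (pos per : Int) (addr : List Char), 4 ≤ pos → 0 ≤ per → per < 4 →
    goA l pos per addr = addr ++ trunc (l.filter (fun c => c ≠ ' ')) (4 - per).toNat := by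
  induction l with
  | nil => intro pos per addr _ _ _; simp [goA, trunc]
  | cons c r ih =>
    intro pos per addr hpos hper0 hper4
    by_cases hc : c = ' '
    · subst hc
      simp only [goA, List.filter_cons]
      rw [ih (pos + 1) per addr (by omega) hper0 hper4]
      simp
    · have hpos' : pos ≥ 4 := hpos
      by_cases hd : c = '.'
      · subst hd
        by_cases hp : per + 1 ≥ 4
        · have hk : (4 - per).toNat ≤ 1 := by omega
          simp [goA, hc, hpos', hp, trunc, hk]
        · have hk : ¬ (4 - per).toNat ≤ 1 := by omega
          rw [show goA ('.' :: r) pos per addr = goA r pos (per + 1) (addr ++ ['.']) by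
            simp [goA, hc, hpos', hp]]
          rw [ih pos (per + 1) (addr ++ ['.']) hpos (by omega) (by omega)]
          have hsub : (4 - (per + 1)).toNat = (4 - per).toNat - 1 := by omega
          simp [trunc, hk, hsub]
      · rw [show goA (c :: r) pos per addr = goA r pos per (addr ++ [c]) by
          simp [goA, hc, hpos', hd]]
        rw [ih pos per (addr ++ [c]) hpos hper0 hper4]
        simp [trunc, hc, hd]

theorem goA_low (l : List Char) : ∀ (n : Int), 1 ≤ n → n ≤ 4 →
    goA l (4 - n) 0 [] =
      (match afterNthSpace l n with
       | none => []
       | some t => trunc (t.filter (fun c => c ≠ ' ')) 4) := by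
  induction l with
  | nil => intro n _ _; simp [goA, afterNthSpace]
  | cons c r ih =>
    intro n h1 h4
    by_cases hc : c = ' '
    · subst hc
      rw [show goA (' ' :: r) (4 - n) 0 [] = goA r (4 - n + 1) 0 [] by simp [goA]]
      by_cases hn : n - 1 = 0
      · rw [show (4 - n + 1 : Int) = 4 by omega]
        rw [goA_high r 4 0 [] (by omega) (by omega) (by omega)]
        simp [afterNthSpace, hn]
      · rw [show (4 - n + 1 : Int) = 4 - (n - 1) by ring]
        rw [ih (n - 1) (by omega) (by omega)]
        simp [afterNthSpace, hn]
    · have hlow : ¬ ((4 - n : Int) ≥ 4) := by omega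
      rw [show goA (c :: r) (4 - n) 0 [] = goA r (4 - n) 0 [] by simp [goA, hc, hlow]]
      rw [ih n h1 h4]
      simp [afterNthSpace, hc]

theorem dots_cast (r : List Char) : ∀ (k : Nat),
    ((PySem.List.enumerate r (k : Int)).filter (fun p => p.2 == '.')).map Prod.fst
      = (dotPos r).map (fun n => ((n + k : Nat) : Int)) := by
  induction r with
  | nil => intro k; simp [PySem.List.enumerate, dotPos]
  | cons c r ih =>
    intro k
    rw [show PySem.List.enumerate (c :: r) (k : Int)
        = ((k : Int), c) :: PySem.List.enumerate r ((k : Int) + 1) from by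
      simp [PySem.List.enumerate]]
    rw [show ((k : Int) + 1) = (((k + 1 : Nat)) : Int) by push_cast; ring]
    by_cases hc : c = '.'
    · subst hc
      simp only [dotPos, List.filter_cons, beq_self_eq_true, if_pos trivial]
      simp only [List.map_cons]
      rw [ih (k + 1)]
      rw [List.cons.injEq]
      constructor
      · push_cast; ring
      · rw [List.map_map]
        apply List.map_congr_left
        intro a _
        simp
        ring
    · have hb : (c == '.') = false := by simp [hc]
      simp only [dotPos, if_neg hc, List.filter_cons]
      simp only [hb, Bool.false_eq_true, if_false]
      rw [ih (k + 1)]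
      rw [List.map_map]
      apply List.map_congr_left
      intro a _
      simp
      ring

theorem getD_map_add_one (l : List Nat) (i : Nat) (h : i < l.length) :
    (l.map (· + 1)).getD i 0 = l.getD i 0 + 1 := by
  rw [List.getD_eq_getElem l 0 h, List.getD_eq_getElem _ 0 (by simpa using h)]
  simp

theorem trunc_slice (r : List Char) : ∀ (k : Nat), 1 ≤ k →
    (if (dotPos r).length < k then r
     else PySem.List.slice r none (some ((((dotPos r).getD (k - 1) 0 + 1 : Nat)) : Int))) = trunc r k := by
  induction r with
  | nil =>
    intro k hk
    simp only [dotPos, List.length_nil]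
    rw [if_pos (by omega)]
    simp [trunc]
  | cons c r ih =>
    intro k hk
    by_cases hc : c = '.'
    · subst hc
      have hcons : trunc ('.' :: r) k = if k ≤ 1 then ['.'] else '.' :: trunc r (k - 1) := by
        simp [trunc]
      have hdot : dotPos ('.' :: r) = 0 :: (dotPos r).map (· + 1) := by simp [dotPos]
      rw [hcons, hdot]
      by_cases h1 : k ≤ 1
      · have hk1 : k = 1 := by omega
        subst hk1
        rw [if_pos h1, if_neg (by simp)]
        rw [PySem.List.slice_to_natCast]
        simp
      · rw [if_neg h1]
        by_cases hlen : (dotPos r).length < k - 1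
        · rw [if_pos (by simp; omega)]
          have h := ih (k - 1) (by omega)
          rw [if_pos hlen] at h
          rw [← h]
        · rw [if_neg (by simp; omega)]
          have h := ih (k - 1) (by omega)
          rw [if_neg hlen] at h
          have hidx : k - 1 - 1 < (dotPos r).length := by omega
          rw [show k - 1 = (k - 1 - 1) + 1 by omega, List.getD_cons_succ,
            getD_map_add_one _ _ hidx]
          rw [show k - 1 - 1 + 1 = k - 1 by omega]
          rw [← h]
          rw [PySem.List.slice_to_natCast, PySem.List.slice_to_natCast]
          simp [List.take_succ_cons]
    · have hcons : trunc (c :: r) k = c :: trunc r k := by simp [trunc, hc]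
      have hdot : dotPos (c :: r) = (dotPos r).map (· + 1) := by simp [dotPos, hc]
      rw [hcons, hdot]
      by_cases hlen : (dotPos r).length < k
      · rw [if_pos (by simpa using hlen)]
        have h := ih k hk
        rw [if_pos hlen] at h
        rw [← h]
      · rw [if_neg (by simpa using hlen)]
        have h := ih k hk
        rw [if_neg hlen] at h
        rw [getD_map_add_one _ _ (by omega)]
        rw [← h]
        rw [PySem.List.slice_to_natCast, PySem.List.slice_to_natCast]
        simp [List.take_succ_cons]

-- ===== VERDICT (by name: the statement is the Claim_ definition above) =====
theorem GetScannerIPAddress_spec : Claim_equal_GetScannerIPAddress := by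
  intro line _
  unfold Spec_GetScannerIPAddress GetScannerIPAddress GetScannerIPAddress_alt
  have h := goA_low line.toList 4 (by omega) (by omega)
  rw [show (4 - 4 : Int) = 0 by norm_num] at h
  rw [h]
  cases hA : afterNthSpace line.toList 4 with
  | none => rfl
  | some t =>
    simp only
    have hd := dots_cast (t.filter (fun c => c ≠ ' ')) 0
    rw [show ((0 : Nat) : Int) = (0 : Int) by norm_num] at hd
    simp only [Nat.add_zero] at hd
    rw [hd]
    have hts := trunc_slice (t.filter (fun c => c ≠ ' ')) 4 (by omega)
    rw [List.length_map]
    by_cases hlen : (dotPos (t.filter (fun c => c ≠ ' '))).length < 4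
    · rw [if_pos hlen]
      rw [if_pos hlen] at hts
      rw [← hts]
    · rw [if_neg hlen]
      rw [if_neg hlen] at hts
      rw [show ((dotPos (t.filter (fun c => c ≠ ' '))).map (fun n => ((n : Nat) : Int))).getD 3 0
          = (((dotPos (t.filter (fun c => c ≠ ' '))).getD 3 0 : Nat) : Int) by
        rw [List.getD_eq_getElem?_getD, List.getD_eq_getElem?_getD, List.getElem?_map]
        cases (dotPos (t.filter (fun c => c ≠ ' ')))[3]? <;> simp]
      rw [show (((dotPos (t.filter (fun c => c ≠ ' '))).getD 3 0 : Nat) : Int) + 1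
          = ((((dotPos (t.filter (fun c => c ≠ ' '))).getD 3 0 + 1 : Nat)) : Int) by push_cast; ring]
      rw [← hts]
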